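-- pv_equiv track=rewrite | github.com/matthew-pisano/torch-spyre | torch_spyre/_inductor/multi_dim_reduction_pass.py | _normalize_dims
-- ===== SOURCE A (Python) =====
-- from typing import List, Optional, Union
--
-- def _normalize_dims(dims: Union[int, List[int]], ndim: int) -> List[int]:
--     """
--     Normalize dimension indices to positive values and return as sorted list.
--     """
--     if isinstance(dims, int):
--         dims = [dims]
--
--     normalized = []
--     for d in dims:
--         if d < 0:
--             d = ndim + d
--         if d < 0 or d >= ndim:
--             raise ValueError(
--                 f"Dimension {d} out of range for tensor with {ndim} dimensions"
--             )
--         normalized.append(d)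
--
--     return sorted(set(normalized), reverse=True)
-- ===== SOURCE B (Python) =====
-- from typing import List, Union
--
-- def _normalize_dims(dims: Union[int, List[int]], ndim: int) -> List[int]:
--     """
--     Normalize dimension indices to positive values and return as sorted list.
--     """
--     if isinstance(dims, int):
--         dims = [dims]
--
--     result = []
--     for d in dims:
--         if d < 0:
--             d = ndim + d
--         if d < 0 or d >= ndim:
--             raise ValueError(
--                 f"Dimension {d} out of range for tensor with {ndim} dimensions"
--             )
--         # insert d into the descending result, skipping duplicates
--         i = 0
--         while i < len(result) and result[i] > d:
--             i += 1
--         if i == len(result) or result[i] != d: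
--             result.insert(i, d)
--     return result
-- ===== Notes on version B (the rewrite author's own statement) =====
-- stated objective: alternative
-- what changed: B replaces A's collect-then-sorted(set(...), reverse=True) with a single pass that inserts each normalized dim into a descending result list, skipping duplicates, so no set and no sort are used.
import Mathlib
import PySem

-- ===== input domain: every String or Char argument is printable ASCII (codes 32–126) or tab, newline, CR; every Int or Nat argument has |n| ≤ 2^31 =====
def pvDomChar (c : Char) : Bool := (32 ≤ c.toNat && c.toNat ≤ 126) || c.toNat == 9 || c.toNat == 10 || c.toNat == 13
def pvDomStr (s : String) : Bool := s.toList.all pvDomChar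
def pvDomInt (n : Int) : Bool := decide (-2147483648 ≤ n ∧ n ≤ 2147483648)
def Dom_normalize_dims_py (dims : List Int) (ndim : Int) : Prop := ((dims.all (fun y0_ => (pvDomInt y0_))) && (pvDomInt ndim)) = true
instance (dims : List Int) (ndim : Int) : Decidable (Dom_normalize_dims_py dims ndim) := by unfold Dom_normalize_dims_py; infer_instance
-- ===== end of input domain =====

-- B replaces A's sorted(set(...), reverse=True) by a single pass that inserts each
-- normalized dim into a descending result list, skipping duplicates — no set, no sort.
-- On dims with an out-of-range entry both Pythons raise the identical ValueError;
-- those inputs are outside Pre_.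

-- ===== PORT A =====
def normalize_dims_py (dims : List Int) (ndim : Int) : List Int :=
  -- the 'raise' path returns no value; those inputs are excluded by Pre_
  let normalized := dims.foldl (fun acc d =>
    let d' := if d < 0 then ndim + d else d
    acc ++ [d']) []
  PySem.List.sorted (PySem.Set.ofList normalized) (fun x => x) true

-- ===== PORT B =====
-- B's inner while-loop + conditional list.insert: skip the elements greater than d,
-- then insert d unless it is already there (exact for every list and d)
def normDescInsert (r : List Int) (d : Int) : List Int :=
  match r with
  | [] => [d]
  | x :: t => if x > d then x :: normDescInsert t d
              else if x ≠ d then d :: x :: t else x :: t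

def normalize_dims_py_alt (dims : List Int) (ndim : Int) : List Int :=
  dims.foldl (fun r d =>
    let d' := if d < 0 then ndim + d else d
    -- the in-range test is B's raise guard; the raising inputs are outside Pre_
    if 0 ≤ d' ∧ d' < ndim then normDescInsert r d' else r) []

-- ===== PRECONDITION & SPEC =====
-- Pre_ excludes exactly the inputs on which A raises ValueError (a dim whose
-- normalized value falls outside [0, ndim)).
def Pre_normalize_dims_py (dims : List Int) (ndim : Int) : Prop :=
  ∀ d ∈ dims, -ndim ≤ d ∧ d < ndim
instance (dims : List Int) (ndim : Int) : Decidable (Pre_normalize_dims_py dims ndim) := by unfold Pre_normalize_dims_py; infer_instance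

def pvWitness_normalize_dims_py : List Int × Int := ([1, -1, 1, 0], 3)

def Spec_normalize_dims_py (dims : List Int) (ndim : Int) (out : List Int) : Prop := out = normalize_dims_py_alt dims ndim
instance (dims : List Int) (ndim : Int) (out : List Int) : Decidable (Spec_normalize_dims_py dims ndim out) := by unfold Spec_normalize_dims_py; infer_instance

-- ===== CLAIM (what is proved, stated in full; the proofs are below) =====
def Claim_equal_normalize_dims_py : Prop := ∀ (dims : List Int) (ndim : Int), Dom_normalize_dims_py dims ndim → Pre_normalize_dims_py dims ndim → Spec_normalize_dims_py dims ndim (normalize_dims_py dims ndim)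

-- ===== LEMMAS AND PROOFS =====

-- proof-only abbreviations for the step functions appearing in the ports
def pvNorm (ndim d : Int) : Int := if d < 0 then ndim + d else d

def pvStep (ndim : Int) (r : List Int) (d : Int) : List Int :=
  let d' := if d < 0 then ndim + d else d
  if 0 ≤ d' ∧ d' < ndim then normDescInsert r d' else r

-- A's accumulation loop is map
theorem pvA_foldl_map (ndim : Int) (dims : List Int) (acc : List Int) :
    dims.foldl (fun acc d =>
      let d' := if d < 0 then ndim + d else d
      acc ++ [d']) acc
    = acc ++ dims.map (pvNorm ndim) := by
  induction dims generalizing acc with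
  | nil => simp
  | cons d t ih => simp [List.foldl_cons, ih, pvNorm]

theorem pvIns_mem (r : List Int) (d x : Int) :
    x ∈ normDescInsert r d ↔ x = d ∨ x ∈ r := by
  induction r with
  | nil => simp [normDescInsert]
  | cons y t ih =>
    by_cases h : y > d
    · simp only [normDescInsert, if_pos h, List.mem_cons, ih]
      tauto
    · by_cases h2 : y ≠ d
      · simp only [normDescInsert, if_neg h, if_pos h2, List.mem_cons]
      · simp only [normDescInsert, if_neg h, if_neg h2, List.mem_cons]
        have h3 : y = d := not_not.mp h2
        subst h3
        tauto

theorem pvIns_pairwise (r : List Int) (d : Int)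
    (h : r.Pairwise (fun a b => b < a)) :
    (normDescInsert r d).Pairwise (fun a b => b < a) := by
  induction r with
  | nil => simp [normDescInsert]
  | cons y t ih =>
    rw [List.pairwise_cons] at h
    by_cases hy : y > d
    · rw [normDescInsert, if_pos hy, List.pairwise_cons]
      refine ⟨fun a ha => ?_, ih h.2⟩
      rcases (pvIns_mem t d a).mp ha with rfl | ha
      · exact hy
      · exact h.1 a ha
    · by_cases h2 : y ≠ d
      · rw [normDescInsert, if_neg hy, if_pos h2, List.pairwise_cons]
        refine ⟨fun a ha => ?_, List.pairwise_cons.mpr h⟩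
        rcases List.mem_cons.mp ha with rfl | ha
        · omega
        · have := h.1 a ha
          omega
      · rw [normDescInsert, if_neg hy, if_neg h2]
        exact List.pairwise_cons.mpr h

-- invariant of B's single pass: descending, members = normalized dims so far
theorem pvFold_inv (ndim : Int) (dims : List Int)
    (hpre : ∀ d ∈ dims, -ndim ≤ d ∧ d < ndim) (r : List Int)
    (hr : r.Pairwise (fun a b => b < a)) :
    (dims.foldl (pvStep ndim) r).Pairwise (fun a b => b < a) ∧
    ∀ x : Int, x ∈ dims.foldl (pvStep ndim) r ↔ x ∈ dims.map (pvNorm ndim) ∨ x ∈ r := by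
  induction dims generalizing r with
  | nil => simp [hr]
  | cons d t ih =>
    have hd := hpre d (by simp)
    have hrange : 0 ≤ (if d < 0 then ndim + d else d) ∧ (if d < 0 then ndim + d else d) < ndim := by
      split <;> omega
    have hstep : (d :: t).foldl (pvStep ndim) r
        = t.foldl (pvStep ndim) (normDescInsert r (if d < 0 then ndim + d else d)) := by
      rw [List.foldl_cons]
      simp only [pvStep, hrange, and_self, if_pos]
    obtain ⟨ih1, ih2⟩ := ih (fun x hx => hpre x (by simp [hx]))
      (normDescInsert r (if d < 0 then ndim + d else d)) (pvIns_pairwise r _ hr)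
    rw [hstep]
    refine ⟨ih1, fun x => ?_⟩
    rw [ih2 x, pvIns_mem]
    simp only [List.map_cons, List.mem_cons, pvNorm]
    tauto

-- ===== VERDICT (by name: the statement is the Claim_ definition above) =====
theorem normalize_dims_py_spec : Claim_equal_normalize_dims_py := by
  intro dims ndim _ hpre
  unfold Spec_normalize_dims_py normalize_dims_py normalize_dims_py_alt
  simp only []
  have hfun : (fun (r : List Int) (d : Int) =>
      if (0 ≤ (if d < 0 then ndim + d else d)) ∧ (if d < 0 then ndim + d else d) < ndim
      then normDescInsert r (if d < 0 then ndim + d else d) else r) = pvStep ndim := by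
    funext r d
    simp [pvStep]
  have hmapA : dims.foldl (fun acc d =>
      let d' := if d < 0 then ndim + d else d
      acc ++ [d']) [] = dims.map (pvNorm ndim) := by
    simpa using pvA_foldl_map ndim dims []
  rw [hmapA, hfun]
  obtain ⟨hpair, hmem⟩ := pvFold_inv ndim dims hpre [] (by simp)
  set ys := dims.foldl (pvStep ndim) [] with hys
  have hnodup : ys.Nodup := List.Pairwise.imp (fun h => ne_of_gt h) hpair
  have hperm : ys.Perm (PySem.Set.ofList (dims.map (pvNorm ndim))) := by
    rw [List.perm_ext_iff_of_nodup hnodup (PySem.Set.nodup_ofList _)]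
    intro a
    rw [PySem.Set.mem_ofList, hmem a]
    simp
  exact PySem.List.sorted_rev_eq_of_perm_of_pairwise_gt _ ys (fun x => x) hperm hpair
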